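-- pv_equiv track=rewrite | github.com/bacnxptit/codePtitDSA | timMaxthamlang.py | timTongMax
-- ===== SOURCE A (Python) =====
-- def timTongMax(arr):
--     arr.sort()
--     max = 0
--     mod  = 10 ** 9 + 7
--     for i in range(0,len(arr)):
--         tich = i * arr[i]
--         tich %= mod
--         max+=tich
--         max %= mod
--     return max
-- ===== SOURCE B (Python) =====
-- def timTongMax(arr):
--     arr.sort()
--     mod = 10 ** 9 + 7
--     suffix = 0
--     total = 0
--     for x in reversed(arr[1:]):
--         suffix = (suffix + x) % mod
--         total = (total + suffix) % mod
--     return total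
-- ===== Notes on version B (the rewrite author's own statement) =====
-- stated objective: alternative
-- what changed: Replaces the forward index*value accumulation with a backward running suffix-sum pass (sum of i*a[i] = sum of tail sums), removing the multiplication entirely.
import Mathlib
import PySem

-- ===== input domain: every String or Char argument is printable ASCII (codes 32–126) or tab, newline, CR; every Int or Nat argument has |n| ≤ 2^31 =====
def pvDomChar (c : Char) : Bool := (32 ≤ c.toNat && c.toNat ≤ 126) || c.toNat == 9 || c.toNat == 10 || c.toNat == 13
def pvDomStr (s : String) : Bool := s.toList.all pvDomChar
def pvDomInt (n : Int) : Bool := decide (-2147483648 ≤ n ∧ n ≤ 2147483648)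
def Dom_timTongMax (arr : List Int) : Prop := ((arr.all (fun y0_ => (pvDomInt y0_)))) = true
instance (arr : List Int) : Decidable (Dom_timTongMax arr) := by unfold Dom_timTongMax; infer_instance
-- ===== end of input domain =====

-- B replaces A's forward i*arr[i] accumulation by a backward running suffix-sum pass;
-- both sort the argument in place identically, so the proved equivalence is about the return value
-- (the observable mutation of arr is the same in A and B).

-- ===== PORT A =====
def timTongMax (arr : List Int) : Int :=
  let s := PySem.List.sorted arr (fun x => x) false
  let m : Int := 10 ^ 9 + 7
  (PySem.List.pyRange 0 (s.length : Int) 1).foldl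
    (fun mx i =>
      let tich := i * PySem.List.pyGetD s i 0
      let tich := PySem.Int.mod tich m
      PySem.Int.mod (mx + tich) m) 0

-- ===== PORT B =====
def timTongMax_alt (arr : List Int) : Int :=
  let s := PySem.List.sorted arr (fun x => x) false
  let m : Int := 10 ^ 9 + 7
  (((s.drop 1).reverse).foldl
    (fun (st : Int × Int) x =>
      let suffix := PySem.Int.mod (st.1 + x) m
      (suffix, PySem.Int.mod (st.2 + suffix) m)) (0, 0)).2

-- ===== PRECONDITION & SPEC =====
def Spec_timTongMax (arr : List Int) (out : Int) : Prop := out = timTongMax_alt arr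
instance (arr : List Int) (out : Int) : Decidable (Spec_timTongMax arr out) := by unfold Spec_timTongMax; infer_instance

-- ===== CLAIM (what is proved, stated in full; the proofs are below) =====
def Claim_equal_timTongMax : Prop := ∀ (arr : List Int), Dom_timTongMax arr → Spec_timTongMax arr (timTongMax arr)

-- ===== LEMMAS AND PROOFS =====

-- the modulus
def pvM : Int := 10 ^ 9 + 7

-- pure (un-modded) weighted sum Σ (k+i)·xs[i], A's quantity
def pvW : List Int → Int → Int
  | [], _ => 0
  | x :: xs, k => k * x + pvW xs (k + 1)

-- pure (un-modded) sum of running prefix sums started at a, B's quantity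
def pvR : List Int → Int → Int
  | [], _ => 0
  | x :: xs, a => (a + x) + pvR xs (a + x)

theorem pvMod_eq (a : Int) : PySem.Int.mod a (10 ^ 9 + 7) = a % pvM := by
  rw [PySem.Int.mod_eq_emod_of_pos (by norm_num)]; rfl

theorem pvR_shift : ∀ (xs : List Int) (a : Int), pvR xs a = pvR xs 0 + (xs.length : Int) * a := by
  intro xs
  induction xs with
  | nil => intro a; simp [pvR]
  | cons x t ih =>
    intro a
    simp only [pvR, List.length_cons, ih (a + x), ih (0 + x)]
    push_cast
    ring

theorem pvW_append (ys : List Int) (z : Int) : ∀ (k : Int),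
    pvW (ys ++ [z]) k = pvW ys k + (k + (ys.length : Int)) * z := by
  induction ys with
  | nil => intro k; simp [pvW]
  | cons y t ih =>
    intro k
    simp only [List.cons_append, pvW, ih (k + 1), List.length_cons]
    push_cast
    ring

-- B's quantity on the reversed list is A's weighted sum starting at rank 1
theorem pvR_eq_pvW_reverse : ∀ (l : List Int), pvR l 0 = pvW l.reverse 1 := by
  intro l
  induction l with
  | nil => simp [pvR, pvW]
  | cons z t ih =>
    simp only [pvR, List.reverse_cons, pvW_append, zero_add, pvR_shift t z, ih,
      List.length_reverse]
    ring

-- A's loop over (index, value) pairs computes (acc + pvW) % M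
theorem pvAfold : ∀ (xs : List Int) (k acc : Int), acc % pvM = acc →
    (PySem.List.enumerate xs k).foldl
      (fun mx p => PySem.Int.mod (mx + PySem.Int.mod (p.1 * p.2) (10 ^ 9 + 7)) (10 ^ 9 + 7)) acc
      = (acc + pvW xs k) % pvM := by
  intro xs
  induction xs with
  | nil => intro k acc h; simpa [PySem.List.enumerate_nil, pvW] using h.symm
  | cons x t ih =>
    intro k acc h
    rw [PySem.List.enumerate_cons, List.foldl_cons]
    rw [ih (k + 1) _ (by rw [pvMod_eq]; exact Int.emod_emod_of_dvd _ dvd_rfl)]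
    simp only [pvMod_eq]
    simp only [pvW]
    generalize k * x = a
    generalize pvW t (k + 1) = w
    have hM : pvM = 10 ^ 9 + 7 := rfl
    rw [hM] at *
    omega

-- B's loop computes (tot + pvR) % M in its second component
theorem pvBfold : ∀ (l : List Int) (suf tot : Int), suf % pvM = suf → tot % pvM = tot →
    ((l.foldl (fun (st : Int × Int) x =>
        (PySem.Int.mod (st.1 + x) (10 ^ 9 + 7),
         PySem.Int.mod (st.2 + PySem.Int.mod (st.1 + x) (10 ^ 9 + 7)) (10 ^ 9 + 7))) (suf, tot)).2)
      = (tot + pvR l suf) % pvM := by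
  intro l
  induction l with
  | nil => intro suf tot _ h; simpa [pvR] using h.symm
  | cons x t ih =>
    intro suf tot hs ht
    rw [List.foldl_cons]
    rw [ih _ _ (by rw [pvMod_eq]; exact Int.emod_emod_of_dvd _ dvd_rfl)
            (by rw [pvMod_eq]; exact Int.emod_emod_of_dvd _ dvd_rfl)]
    simp only [pvMod_eq]
    simp only [pvR, pvR_shift t ((suf + x) % pvM), pvR_shift t (suf + x)]
    generalize suf + x = s
    generalize pvR t 0 = w
    generalize (t.length : Int) = n
    show Int.ModEq pvM _ _
    have hmods : Int.ModEq pvM (s % pvM) s := Int.emod_emod_of_dvd s dvd_rfl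
    have hself : ((tot + s % pvM) % pvM) ≡ tot + s [ZMOD pvM] :=
      Int.ModEq.trans (Int.emod_emod_of_dvd _ dvd_rfl) ((Int.ModEq.refl tot).add hmods)
    calc (tot + s % pvM) % pvM + (w + n * (s % pvM))
        ≡ (tot + s) + (w + n * s) [ZMOD pvM] :=
          hself.add ((Int.ModEq.refl w).add (hmods.mul_left n))
      _ = tot + (s + (w + n * s)) := by ring

-- the two ports on the sorted list, case split on emptiness
theorem pvMain (s : List Int) :
    (PySem.List.pyRange 0 (s.length : Int) 1).foldl
      (fun mx i =>
        PySem.Int.mod (mx + PySem.Int.mod (i * PySem.List.pyGetD s i 0) (10 ^ 9 + 7)) (10 ^ 9 + 7)) 0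
    = (((s.drop 1).reverse).foldl
        (fun (st : Int × Int) x =>
          (PySem.Int.mod (st.1 + x) (10 ^ 9 + 7),
           PySem.Int.mod (st.2 + PySem.Int.mod (st.1 + x) (10 ^ 9 + 7)) (10 ^ 9 + 7))) (0, 0)).2 := by
  have hA : (PySem.List.pyRange 0 (s.length : Int) 1).foldl
      (fun mx i =>
        PySem.Int.mod (mx + PySem.Int.mod (i * PySem.List.pyGetD s i 0) (10 ^ 9 + 7)) (10 ^ 9 + 7)) 0
      = (PySem.List.enumerate s 0).foldl
        (fun mx p => PySem.Int.mod (mx + PySem.Int.mod (p.1 * p.2) (10 ^ 9 + 7)) (10 ^ 9 + 7)) 0 := by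
    rw [PySem.List.enumerate_eq_map_pyRange (d := 0), List.foldl_map]
    simp
  rw [hA, pvAfold s 0 0 rfl, pvBfold _ 0 0 rfl rfl]
  cases s with
  | nil => simp [pvW, pvR]
  | cons x t =>
    simp only [pvW, List.drop_succ_cons, List.drop_zero, zero_add, zero_mul]
    rw [pvR_eq_pvW_reverse t.reverse, List.reverse_reverse]

-- ===== VERDICT (by name: the statement is the Claim_ definition above) =====
theorem timTongMax_spec : Claim_equal_timTongMax := by
  intro arr _
  unfold Spec_timTongMax timTongMax timTongMax_alt
  exact pvMain _
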